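-- pv_equiv track=rewrite | github.com/twntyn3/alfav2 | src/text_processor.py | merge_short_paragraphs
-- ===== SOURCE A (Python) =====
-- def merge_short_paragraphs(text: str, min_length: int = 50) -> str:
--     """
--     Merge short paragraphs to improve chunking quality.
--
--     Args:
--         text: Text with paragraphs separated by newlines
--         min_length: Minimum character length for standalone paragraph
--
--     Returns:
--         Text with short paragraphs merged
--     """
--     if not text:
--         return ""
--
--     paragraphs = text.split("\n")
--     merged = []
--     current = ""
--
--     for para in paragraphs:
--         para = para.strip()
--         if not para:
--             if current:
--                 merged.append(current)
--                 current = ""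
--             continue
--
--         # if current paragraph is short, try to merge with next
--         if len(current) < min_length and current:
--             current += " " + para
--         else:
--             if current:
--                 merged.append(current)
--             current = para
--
--     if current:
--         merged.append(current)
--
--     return "\n".join(merged)
-- ===== SOURCE B (Python) =====
-- def merge_short_paragraphs(text: str, min_length: int = 50) -> str:
--     # Two-phase: partition stripped lines into blank-separated runs, then greedily merge each run.
--     lines = [ln.strip() for ln in text.split("\n")]
--     runs = []
--     run = []
--     for ln in lines:
--         if ln:
--             run.append(ln)
--         elif run:
--             runs.append(run)
--             run = []
--     if run:
--         runs.append(run)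
--     out = []
--     for run in runs:
--         cur = run[0]
--         for p in run[1:]:
--             if len(cur) < min_length:
--                 cur += " " + p
--             else:
--                 out.append(cur)
--                 cur = p
--         out.append(cur)
--     return "\n".join(out)
-- ===== Notes on version B (the rewrite author's own statement) =====
-- stated objective: alternative
-- what changed: A's single stateful loop (one fold carrying merged+current with in-loop flushing) is decomposed into two phases: first partition the stripped lines into maximal blank-separated runs, then greedily merge each run independently and join the flattened results.
import Mathlib
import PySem

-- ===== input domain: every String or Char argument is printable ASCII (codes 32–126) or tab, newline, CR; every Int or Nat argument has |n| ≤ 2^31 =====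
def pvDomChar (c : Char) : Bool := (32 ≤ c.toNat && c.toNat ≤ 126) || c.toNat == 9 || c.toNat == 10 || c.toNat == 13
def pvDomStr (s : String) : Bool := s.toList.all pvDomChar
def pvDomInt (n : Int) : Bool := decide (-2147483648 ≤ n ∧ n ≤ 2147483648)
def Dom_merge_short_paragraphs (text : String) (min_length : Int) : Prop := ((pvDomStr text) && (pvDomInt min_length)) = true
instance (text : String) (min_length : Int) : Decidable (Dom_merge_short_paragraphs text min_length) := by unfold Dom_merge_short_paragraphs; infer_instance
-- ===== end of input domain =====

-- B re-decomposes A's single stateful loop into two phases (partition stripped lines into blank-separated runs, then greedily merge each run); same cost, alternative structure.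

-- ===== PORT A =====
-- loop body of A's for-loop (state = (merged, current)); `if current:` is `st.2 ≠ ""`
def pvStepA (m : Int) (st : List String × String) (line : String) : List String × String :=
  let para := PySem.Str.strip line
  if para = "" then
    (if st.2 ≠ "" then (st.1 ++ [st.2], "") else st)
  else if PySem.Str.len st.2 < m ∧ st.2 ≠ "" then
    (st.1, st.2 ++ " " ++ para)
  else
    (if st.2 ≠ "" then (st.1 ++ [st.2], para) else (st.1, para))

-- trailing `if current: merged.append(current)`
def pvFlushA (st : List String × String) : List String :=
  if st.2 ≠ "" then st.1 ++ [st.2] else st.1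

def merge_short_paragraphs (text : String) (min_length : Int) : String :=
  if text = "" then ""
  else  -- paragraphs = text.split("\n"); sep "\n" ≠ "" so split? is always some
    PySem.Str.join "\n"
      (pvFlushA (((PySem.Str.split? text "\n").getD []).foldl (pvStepA min_length) ([], "")))

-- ===== PORT B =====
-- phase 1 loop body: collect maximal runs of non-blank stripped lines (state = (runs, run))
def pvStepRuns (st : List (List String) × List String) (ln : String) : List (List String) × List String :=
  if ln ≠ "" then (st.1, st.2 ++ [ln])
  else if st.2 ≠ [] then (st.1 ++ [st.2], []) else st

def pvFlushRuns (st : List (List String) × List String) : List (List String) :=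
  if st.2 ≠ [] then st.1 ++ [st.2] else st.1

-- phase 2 inner loop body: greedy merge within one run (state = (out, cur))
def pvStepMerge (m : Int) (st : List String × String) (p : String) : List String × String :=
  if PySem.Str.len st.2 < m then (st.1, st.2 ++ " " ++ p) else (st.1 ++ [st.2], p)

-- phase 2 outer loop body: one run (cur = run[0], fold over run[1:], then append cur)
def pvStepRun (m : Int) (out : List String) (run : List String) : List String :=
  match run with
  | [] => out
  | c :: rest =>
    let r := rest.foldl (pvStepMerge m) (out, c)
    r.1 ++ [r.2]

def merge_short_paragraphs_alt (text : String) (min_length : Int) : String :=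
  PySem.Str.join "\n"
    ((pvFlushRuns ((((PySem.Str.split? text "\n").getD []).map PySem.Str.strip).foldl
        pvStepRuns ([], []))).foldl (pvStepRun min_length) [])

-- ===== PRECONDITION & SPEC =====
def Spec_merge_short_paragraphs (text : String) (min_length : Int) (out : String) : Prop := out = merge_short_paragraphs_alt text min_length
instance (text : String) (min_length : Int) (out : String) : Decidable (Spec_merge_short_paragraphs text min_length out) := by unfold Spec_merge_short_paragraphs; infer_instance

-- ===== CLAIM (what is proved, stated in full; the proofs are below) =====
def Claim_equal_merge_short_paragraphs : Prop := ∀ (text : String) (min_length : Int), Dom_merge_short_paragraphs text min_length → Spec_merge_short_paragraphs text min_length (merge_short_paragraphs text min_length)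

-- ===== LEMMAS AND PROOFS =====

-- pvEmit m (stripped lines) current = the paragraphs A's loop (incl. final flush) emits
def pvEmit (m : Int) : List String → String → List String
  | [], c => if c = "" then [] else [c]
  | p :: ps, c =>
    if p = "" then (if c = "" then pvEmit m ps "" else c :: pvEmit m ps "")
    else if PySem.Str.len c < m ∧ c ≠ "" then pvEmit m ps (c ++ " " ++ p)
    else if c = "" then pvEmit m ps p else c :: pvEmit m ps p

-- runs of consecutive non-empty strings, with the current run accumulated
def pvGrp : List String → List String → List (List String)
  | [], run => if run = [] then [] else [run]
  | l :: ls, run =>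
    if l ≠ "" then pvGrp ls (run ++ [l])
    else if run ≠ [] then run :: pvGrp ls [] else pvGrp ls []

-- greedy merge of one run, starting from current paragraph c
def pvMergeFrom (m : Int) : String → List String → List String
  | c, [] => [c]
  | c, p :: ps =>
    if PySem.Str.len c < m then pvMergeFrom m (c ++ " " ++ p) ps
    else c :: pvMergeFrom m p ps

def pvMergeRun (m : Int) : List String → List String
  | [] => []
  | c :: rest => pvMergeFrom m c rest

theorem pv_str_append_space_ne (c p : String) : c ++ " " ++ p ≠ "" := by
  intro h
  have := congrArg String.toList h
  simp [String.toList_append] at this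

-- A's fold, characterized by pvEmit
theorem pvA_fold (m : Int) (ls : List String) : ∀ (acc : List String) (c : String),
    pvFlushA (ls.foldl (pvStepA m) (acc, c)) = acc ++ pvEmit m (ls.map PySem.Str.strip) c := by
  induction ls with
  | nil => intro acc c; by_cases hc : c = "" <;> simp [pvFlushA, pvEmit, hc]
  | cons l ls ih =>
    intro acc c
    rw [List.foldl_cons]
    by_cases hp : PySem.Str.strip l = "" <;> by_cases hml : (c.length : Int) < m <;>
      by_cases hc : c = "" <;>
      simp [pvStepA, pvEmit, hp, hml, hc, ih]

-- B's grouping fold, characterized by pvGrp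
theorem pvB_grp_fold (ls : List String) : ∀ (acc : List (List String)) (run : List String),
    pvFlushRuns (ls.foldl pvStepRuns (acc, run)) = acc ++ pvGrp ls run := by
  induction ls with
  | nil => intro acc run; by_cases h : run = [] <;> simp [pvFlushRuns, pvGrp, h]
  | cons l ls ih =>
    intro acc run
    rw [List.foldl_cons]
    simp only [pvGrp, pvStepRuns]
    by_cases hl : l = ""
    · by_cases hr : run = []
      · rw [if_neg (by simp [hl]), if_neg (by simp [hr]), if_neg (by simp [hl]), if_neg (by simp [hr])]
        rw [ih, hr]
      · rw [if_neg (by simp [hl]), if_pos (by simp [hr]), if_neg (by simp [hl]), if_pos (by simp [hr])]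
        rw [ih]; simp
    · rw [if_pos (by simp [hl]), if_pos (by simp [hl])]
      rw [ih]

-- B's inner merge fold, characterized by pvMergeFrom
theorem pvB_inner_fold (m : Int) (ps : List String) : ∀ (out : List String) (c : String),
    (let r := ps.foldl (pvStepMerge m) (out, c); r.1 ++ [r.2]) = out ++ pvMergeFrom m c ps := by
  induction ps with
  | nil => intro out c; simp [pvMergeFrom]
  | cons p ps ih =>
    intro out c
    rw [List.foldl_cons]
    simp only [pvMergeFrom, pvStepMerge]
    by_cases hm : PySem.Str.len c < m
    · rw [if_pos hm, if_pos hm]; rw [ih]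
    · rw [if_neg hm, if_neg hm]; rw [ih]; simp

-- B's outer fold over runs
theorem pvB_outer_fold (m : Int) (runs : List (List String)) : ∀ (out : List String),
    runs.foldl (pvStepRun m) out = out ++ runs.flatMap (pvMergeRun m) := by
  induction runs with
  | nil => intro out; simp
  | cons run runs ih =>
    intro out
    rw [List.foldl_cons, List.flatMap_cons]
    cases run with
    | nil => rw [ih]; simp [pvStepRun, pvMergeRun]
    | cons c rest =>
      rw [ih]
      have : pvStepRun m out (c :: rest) = out ++ pvMergeRun m (c :: rest) := by
        simp only [pvStepRun, pvMergeRun]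
        exact pvB_inner_fold m rest out c
      rw [this]; simp

-- continuing with a nonempty current c consumes exactly the leading run
theorem pvEmit_run (m : Int) (ls : List String) : ∀ (c : String), c ≠ "" →
    pvEmit m ls c = pvMergeFrom m c (ls.takeWhile (· ≠ "")) ++ pvEmit m (ls.dropWhile (· ≠ "")) "" := by
  induction ls with
  | nil => intro c hc; simp [pvEmit, pvMergeFrom, hc]
  | cons p ps ih =>
    intro c hc
    by_cases hp : p = ""
    · subst hp
      simp [pvEmit, hc, pvMergeFrom, List.takeWhile, List.dropWhile]
    · rw [show (p :: ps).takeWhile (· ≠ "") = p :: ps.takeWhile (· ≠ "") by simp [hp],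
          show (p :: ps).dropWhile (· ≠ "") = ps.dropWhile (· ≠ "") by simp [hp]]
      simp only [pvEmit, pvMergeFrom]
      rw [if_neg hp]
      by_cases hm : PySem.Str.len c < m
      · rw [if_pos ⟨hm, hc⟩, if_pos hm]
        exact ih _ (pv_str_append_space_ne c p)
      · rw [if_neg (by tauto), if_neg hc, if_neg hm]
        rw [ih p hp]; simp

theorem pvGrp_run (ls : List String) : ∀ (run : List String), run ≠ [] →
    pvGrp ls run = (run ++ ls.takeWhile (· ≠ "")) :: pvGrp (ls.dropWhile (· ≠ "")) [] := by
  induction ls with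
  | nil => intro run hr; simp [pvGrp, hr]
  | cons l ls ih =>
    intro run hr
    by_cases hl : l = ""
    · subst hl
      simp [pvGrp, hr, List.takeWhile, List.dropWhile]
    · rw [show (l :: ls).takeWhile (· ≠ "") = l :: ls.takeWhile (· ≠ "") by simp [hl],
          show (l :: ls).dropWhile (· ≠ "") = ls.dropWhile (· ≠ "") by simp [hl]]
      simp only [pvGrp]
      rw [if_pos (by simp [hl])]
      rw [ih _ (by simp)]
      simp

-- the central bridge: A's emission equals B's run-by-run merge
theorem pvEmit_eq_grp (m : Int) : ∀ (n : Nat) (ls : List String), ls.length ≤ n →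
    pvEmit m ls "" = (pvGrp ls []).flatMap (pvMergeRun m) := by
  intro n
  induction n with
  | zero =>
    intro ls h
    have : ls = [] := List.eq_nil_of_length_eq_zero (Nat.le_zero.mp h)
    subst this; simp [pvEmit, pvGrp]
  | succ n ih =>
    intro ls h
    cases ls with
    | nil => simp [pvEmit, pvGrp]
    | cons p ps =>
      by_cases hp : p = ""
      · subst hp
        have := ih ps (by simpa using Nat.le_of_succ_le_succ h)
        simpa [pvEmit, pvGrp] using this
      · have h1 : pvEmit m (p :: ps) "" = pvEmit m ps p := by
          simp [pvEmit, hp]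
        rw [h1, pvEmit_run m ps p hp]
        rw [show pvGrp (p :: ps) [] = pvGrp ps [p] by simp [pvGrp, hp]]
        rw [pvGrp_run ps [p] (by simp)]
        have hd : (ps.dropWhile (· ≠ "")).length ≤ n := by
          have := List.length_dropWhile_le (p := fun s : String => decide (s ≠ "")) (l := ps)
          have hps : ps.length ≤ n := by simpa using Nat.le_of_succ_le_succ h
          omega
        rw [ih _ hd]
        simp [pvMergeRun]

-- ===== VERDICT (by name: the statement is the Claim_ definition above) =====
theorem merge_short_paragraphs_spec : Claim_equal_merge_short_paragraphs := by
  intro text min_length _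
  unfold Spec_merge_short_paragraphs merge_short_paragraphs merge_short_paragraphs_alt
  by_cases ht : text = ""
  · subst ht
    have h0 : (PySem.Str.split? "" "\n").getD [] = [""] := by decide
    have h1 : PySem.Str.strip "" = "" := by decide
    rw [if_pos rfl, h0]
    simp [h1, pvStepRuns, pvFlushRuns, PySem.Str.join]
  · rw [if_neg ht]
    rw [pvA_fold, pvB_grp_fold, pvB_outer_fold]
    rw [pvEmit_eq_grp min_length (((PySem.Str.split? text "\n").getD []).map PySem.Str.strip).length _ le_rfl]
    simp
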